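-- pv_equiv track=rewrite | github.com/FlashAce009/python | 分钱问题.py | notalwaysaverangemoney
-- ===== SOURCE A (Python) =====
-- def notalwaysaverangemoney(money,people):
--     if people>money:
--         return 0
--     if people==1:
--         return 1
--     total=0
--     for i in range(1,money-people+2):
--         total+=notalwaysaverangemoney(money-i,people-1)
--     return total
-- ===== SOURCE B (Python) =====
-- def notalwaysaverangemoney(money, people):
--     # closed-form: number of compositions of `money` into `people` positive
--     # parts is C(money-1, people-1); computed by the multiplicative formula.
--     if people > money:
--         return 0
--     n = money - 1
--     k = people - 1
--     r = 1
--     for i in range(1, k + 1):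
--         r = r * (n - k + i) // i
--     return r
-- ===== Notes on version B (the rewrite author's own statement) =====
-- stated objective: alternative
-- what changed: Replaces the recursive summation over all possible first parts by the closed-form binomial coefficient C(money-1, people-1), computed with the multiplicative formula in one loop of people-1 exact-division steps.
import Mathlib
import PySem

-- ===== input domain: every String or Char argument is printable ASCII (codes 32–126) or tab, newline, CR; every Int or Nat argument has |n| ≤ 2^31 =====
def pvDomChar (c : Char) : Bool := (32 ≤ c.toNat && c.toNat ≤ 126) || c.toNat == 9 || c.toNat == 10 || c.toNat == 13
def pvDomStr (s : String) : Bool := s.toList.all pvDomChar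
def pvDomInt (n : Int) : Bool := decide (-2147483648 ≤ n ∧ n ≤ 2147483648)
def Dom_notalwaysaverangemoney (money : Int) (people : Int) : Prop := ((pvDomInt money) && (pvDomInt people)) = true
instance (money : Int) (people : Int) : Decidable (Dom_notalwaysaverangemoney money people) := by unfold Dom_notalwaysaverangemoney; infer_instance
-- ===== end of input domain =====

-- B replaces A's recursive summation over all first parts by the closed-form
-- binomial C(money-1, people-1) computed with the multiplicative formula.

-- ===== PORT A =====
-- A's recursion is not structurally decreasing for people ≤ 0 (where the Python
-- recurses forever); the fuel parameter only makes the same computation total —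
-- fuel people.toNat + 1 is enough for every input Pre_ admits.
def pvGoA : Nat → Int → Int → Int
  | 0, _, _ => 0
  | f + 1, money, people =>
    if people > money then 0
    else if people = 1 then 1
    else (PySem.List.pyRange 1 (money - people + 2) 1).foldl
          (fun total i => total + pvGoA f (money - i) (people - 1)) 0

def notalwaysaverangemoney (money : Int) (people : Int) : Int :=
  pvGoA (people.toNat + 1) money people

-- ===== PORT B =====
def notalwaysaverangemoney_alt (money : Int) (people : Int) : Int :=
  if people > money then 0
  else
    let n := money - 1
    let k := people - 1
    (PySem.List.pyRange 1 (k + 1) 1).foldl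
      (fun r i => PySem.Int.floordiv (r * (n - k + i)) i) 1

-- ===== PRECONDITION & SPEC =====
-- Pre_ excludes exactly the inputs with people ≤ 0 and people ≤ money, on which
-- the Python A recurses forever (RecursionError).
def Pre_notalwaysaverangemoney (money : Int) (people : Int) : Prop :=
  1 ≤ people ∨ money < people

instance (money : Int) (people : Int) : Decidable (Pre_notalwaysaverangemoney money people) := by
  unfold Pre_notalwaysaverangemoney; infer_instance

def pvWitness_notalwaysaverangemoney : Int × Int := (7, 3)

def Spec_notalwaysaverangemoney (money : Int) (people : Int) (out : Int) : Prop :=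
  out = notalwaysaverangemoney_alt money people

instance (money : Int) (people : Int) (out : Int) : Decidable (Spec_notalwaysaverangemoney money people out) := by
  unfold Spec_notalwaysaverangemoney; infer_instance

-- ===== CLAIM (what is proved, stated in full; the proofs are below) =====
def Claim_equal_notalwaysaverangemoney : Prop :=
  ∀ (money : Int) (people : Int), Dom_notalwaysaverangemoney money people →
    Pre_notalwaysaverangemoney money people →
    Spec_notalwaysaverangemoney money people (notalwaysaverangemoney money people)

-- ===== LEMMAS AND PROOFS =====

-- Hockey stick, list-sum form: Σ_{i=1}^{R} C(M-i, c) = C(M, c+1) when M = c + R.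
lemma pv_listsum (c : Nat) (R : Nat) : ∀ (M : Int), (c : Int) + R = M →
    ((PySem.List.pyRange 1 ((R : Int) + 1) 1).map
      (fun i => (((M - i).toNat.choose c : Nat) : Int))).sum
      = ((M.toNat.choose (c + 1) : Nat) : Int) := by
  induction R with
  | zero =>
    intro M h
    have hM : M = (c : Int) := by omega
    subst hM
    rw [PySem.List.pyRange_one_eq_nil (by norm_num)]
    simp [Nat.choose_succ_self]
  | succ R ih =>
    intro M h
    push_cast
    push_cast at h
    rw [PySem.List.pyRange_one_cons (by omega)]
    have hshift :
        (PySem.List.pyRange (1 + 1) (((R : Int) + 1) + 1) 1).map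
            (fun i => (((M - i).toNat.choose c : Nat) : Int))
          = (PySem.List.pyRange 1 ((R : Int) + 1) 1).map
            (fun i => ((((M - 1) - i).toNat.choose c : Nat) : Int)) := by
      rw [PySem.List.pyRange_one, PySem.List.pyRange_one]
      rw [show (((R : Int) + 1) + 1 - (1 + 1)).toNat = R by omega]
      rw [show (((R : Int) + 1) - 1).toNat = R by omega]
      simp only [List.map_map]
      apply List.map_congr_left
      intro k _
      simp only [Function.comp]
      congr 2
      omega
    rw [List.map_cons, List.sum_cons, hshift, ih (M - 1) (by omega)]
    have hM0 : (0:Int) ≤ M - 1 := by omega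
    have e1 : (M - 1).toNat + 1 = M.toNat := by omega
    rw [show ((M.toNat.choose (c+1) : Nat) : Int) = (((M-1).toNat + 1).choose (c+1) : Nat) by rw [e1]]
    rw [Nat.choose_succ_succ ((M-1).toNat) c]
    push_cast
    ring

-- A computes the binomial coefficient C(money-1, people-1) (given enough fuel).
lemma pv_goA_eq : ∀ (f : Nat) (money people : Int), 1 ≤ people → people ≤ money →
    people.toNat ≤ f →
    pvGoA f money people = (((money - 1).toNat.choose (people - 1).toNat : Nat) : Int) := by
  intro f
  induction f with
  | zero => intro money people h1 _ hf; omega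
  | succ f ih =>
    intro money people h1 h2 hf
    rw [pvGoA]
    rw [if_neg (by omega)]
    by_cases hp1 : people = 1
    · rw [if_pos hp1]
      subst hp1
      simp
    · rw [if_neg hp1]
      have hp2 : 2 ≤ people := by omega
      have hcong : (PySem.List.pyRange 1 (money - people + 2) 1).foldl
            (fun total i => total + pvGoA f (money - i) (people - 1)) 0
          = (PySem.List.pyRange 1 (money - people + 2) 1).foldl
            (fun total i => total + ((((money - 1 - i).toNat.choose (people - 2).toNat : Nat) : Int))) 0 := by
        apply PySem.List.foldl_congr_mem
        intro acc x hx
        rw [PySem.List.mem_pyRange_one] at hx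
        rw [ih (money - x) (people - 1) (by omega) (by omega) (by omega),
            show people - 1 - 1 = people - 2 from by ring,
            show money - x - 1 = money - 1 - x from by ring]
      rw [hcong, PySem.List.foldl_add]
      have hR : (money - people + 2 : Int) = ((money - people + 1).toNat : Int) + 1 := by omega
      rw [hR]
      have := pv_listsum (people - 2).toNat (money - people + 1).toNat (money - 1)
        (by omega)
      rw [this, show (people - 2).toNat + 1 = (people - 1).toNat from by omega]
      ring

-- B's multiplicative loop computes C(n-k+j, j) after the first j iterations.
lemma pv_bloop (n k : Int) (_hk : 0 ≤ k) (hkn : k ≤ n) :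
    ∀ (j : Nat), (j : Int) ≤ k →
    (PySem.List.pyRange 1 ((j : Int) + 1) 1).foldl
        (fun r i => PySem.Int.floordiv (r * (n - k + i)) i) 1
      = (((n - k + j).toNat.choose j : Nat) : Int) := by
  intro j
  induction j with
  | zero =>
    intro _
    rw [PySem.List.pyRange_one_eq_nil (by norm_num)]
    simp
  | succ j ih =>
    intro hj
    have hj' : (j : Int) ≤ k := by push_cast at hj ⊢; omega
    rw [show ((j : Nat) + 1 : Nat) = (j + 1 : Nat) from rfl]
    rw [show (((j : Nat) + 1 : Nat) : Int) + 1 = ((j : Int) + 1) + 1 by push_cast; ring]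
    rw [PySem.List.pyRange_one_succ_right (by omega)]
    rw [List.foldl_append, ih hj']
    simp only [List.foldl_cons, List.foldl_nil]
    -- the step: floordiv (C(A, j) * (A+1)) (j+1) = C(A+1, j+1) where A = (n-k+j).toNat
    have hA0 : (0:Int) ≤ n - k + j := by omega
    set A : Nat := (n - k + j).toNat with hA
    have hcast : (n - k + ((j : Int) + 1)) = ((A + 1 : Nat) : Int) := by
      push_cast; omega
    rw [hcast]
    rw [show ((A.choose j : Nat) : Int) * ((A + 1 : Nat) : Int) = (((A.choose j) * (A + 1) : Nat) : Int) by push_cast; ring]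
    rw [show ((j : Int) + 1) = (((j + 1 : Nat) : Nat) : Int) by push_cast; ring]
    rw [PySem.Int.floordiv_natCast]
    congr 1
    rw [show A.choose j * (A + 1) = (A + 1) * A.choose j by ring]
    rw [Nat.add_one_mul_choose_eq]
    rw [show (n - k + (((j+1 : Nat) : Nat) : Int)).toNat = A + 1 by push_cast; omega]
    exact Nat.mul_div_cancel _ (by omega)

-- ===== VERDICT (by name: the statement is the Claim_ definition above) =====
theorem notalwaysaverangemoney_spec : Claim_equal_notalwaysaverangemoney := by
  intro money people _ hpre
  unfold Spec_notalwaysaverangemoney notalwaysaverangemoney notalwaysaverangemoney_alt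
  by_cases hgt : people > money
  · rw [if_pos hgt]
    rw [show people.toNat + 1 = Nat.succ people.toNat from rfl, pvGoA]
    rw [if_pos hgt]
  · rw [if_neg hgt]
    have h1 : 1 ≤ people := by
      rcases hpre with h | h
      · exact h
      · omega
    have h2 : people ≤ money := by omega
    rw [pv_goA_eq (people.toNat + 1) money people h1 h2 (by omega)]
    have hb := pv_bloop (money - 1) (people - 1) (by omega) (by omega) (people - 1).toNat
      (by omega)
    rw [show (((people - 1).toNat : Int) + 1) = (people - 1) + 1 by omega] at hb
    rw [hb]
    congr 2
    omega
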